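-- pv_equiv track=rewrite | github.com/Fabio-A-Sa/Y1S1-ProgramingFundamentals | ME/ME 02 - Practice for PE02/5 - Number of patterns in a word.py | subpatterns
-- ===== SOURCE A (Python) =====
-- def is_pattern(astring):
--
--     net = 0
--     for i in range(len(astring)-1):
--         if astring[i+1] > astring[i]:
--             net += 1
--         if astring[i+1] < astring[i]:
--             net -= 1
--
--     return net == 0
--
-- def subpatterns(astring):
--
--     counter = 0
--
--     for step in range(2, len(astring) + 1):
--
--         for char_index in range(0, len(astring) - step + 1):
--
--             sub_str = astring[char_index:char_index+step]
--             if is_pattern(sub_str):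
--                 counter += 1
--             else:
--                 continue
--
--     return f"The string '{astring}' contains {counter} substring patterns."
-- ===== SOURCE B (Python) =====
-- def subpatterns(astring):
--     # A substring s[i:j+1] (length >= 2) is a "pattern" iff the net number of
--     # rising minus falling adjacent steps inside it is zero.  With P[k] = net
--     # steps over s[0:k+1], that is P[j] == P[i], so the answer is the number of
--     # index pairs i < j with equal prefix value -- countable in one pass with a
--     # dictionary of prefix-value frequencies.
--     counts = {0: 1}
--     p = 0
--     counter = 0
--     for k in range(1, len(astring)):
--         if astring[k] > astring[k - 1]:
--             p += 1
--         elif astring[k] < astring[k - 1]: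
--             p -= 1
--         counter += counts.get(p, 0)
--         counts[p] = counts.get(p, 0) + 1
--     return f"The string '{astring}' contains {counter} substring patterns."
-- ===== Notes on version B (the rewrite author's own statement) =====
-- stated objective: faster
-- what changed: Replaced the enumerate-every-substring-and-rescan-it triple loop by a single pass that maintains the prefix net-step value and a frequency dictionary, counting equal-prefix index pairs.
import Mathlib
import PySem

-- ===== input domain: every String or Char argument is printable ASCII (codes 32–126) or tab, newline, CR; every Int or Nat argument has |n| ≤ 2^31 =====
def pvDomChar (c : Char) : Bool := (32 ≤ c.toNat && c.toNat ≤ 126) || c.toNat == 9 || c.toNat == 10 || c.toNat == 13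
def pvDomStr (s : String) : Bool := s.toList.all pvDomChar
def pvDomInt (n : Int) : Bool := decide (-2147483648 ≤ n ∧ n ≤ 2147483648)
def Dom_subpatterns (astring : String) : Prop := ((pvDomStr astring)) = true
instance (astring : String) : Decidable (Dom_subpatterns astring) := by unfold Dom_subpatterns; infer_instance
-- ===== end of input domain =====

-- B replaces A's scan of every substring by one pass that counts pairs of equal
-- prefix net-step values with a frequency dictionary (measured faster).

-- ===== PORT A =====
-- A's helper is_pattern, on the character list of the (sub)string
def isPattern (s : List Char) : Bool :=
  ((PySem.List.pyRange 0 ((s.length : Int) - 1) 1).foldl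
      (fun (net : Int) i =>
        let net := if PySem.List.pyGetD s (i + 1) ' ' > PySem.List.pyGetD s i ' ' then net + 1 else net
        if PySem.List.pyGetD s (i + 1) ' ' < PySem.List.pyGetD s i ' ' then net - 1 else net)
      0) == 0

-- A's counter accumulation (the two nested for loops)
def subpatternsCounter (cs : List Char) : Int :=
  (PySem.List.pyRange 2 ((cs.length : Int) + 1) 1).foldl
    (fun counter step =>
      (PySem.List.pyRange 0 ((cs.length : Int) - step + 1) 1).foldl
        (fun counter ci =>
          if isPattern (PySem.List.slice cs (some ci) (some (ci + step))) then counter + 1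
          else counter)
        counter)
    0

def subpatterns (astring : String) : String :=
  "The string '" ++ astring ++ "' contains "
    ++ PySem.Int.toStr (subpatternsCounter astring.toList) ++ " substring patterns."

-- ===== PORT B =====
-- B's single pass: state (counts, p, counter)
def subpatternsAltState (cs : List Char) : PySem.Dict Int Int × Int × Int :=
  (PySem.List.pyRange 1 (cs.length : Int) 1).foldl
    (fun (st : PySem.Dict Int Int × Int × Int) k =>
      let counts := st.1
      let p := st.2.1
      let counter := st.2.2
      let p :=
        if PySem.List.pyGetD cs k ' ' > PySem.List.pyGetD cs (k - 1) ' ' then p + 1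
        else if PySem.List.pyGetD cs k ' ' < PySem.List.pyGetD cs (k - 1) ' ' then p - 1
        else p
      let counter := counter + counts.getD p 0
      let counts := counts.insert p (counts.getD p 0 + 1)
      (counts, p, counter))
    (PySem.Dict.ofList [((0 : Int), (1 : Int))], 0, 0)

def subpatterns_alt (astring : String) : String :=
  "The string '" ++ astring ++ "' contains "
    ++ PySem.Int.toStr (subpatternsAltState astring.toList).2.2 ++ " substring patterns."

-- ===== PRECONDITION & SPEC =====
def Spec_subpatterns (astring : String) (out : String) : Prop := out = subpatterns_alt astring
instance (astring : String) (out : String) : Decidable (Spec_subpatterns astring out) := by unfold Spec_subpatterns; infer_instance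

-- ===== CLAIM (what is proved, stated in full; the proofs are below) =====
def Claim_equal_subpatterns : Prop := ∀ (astring : String), Dom_subpatterns astring → Spec_subpatterns astring (subpatterns astring)

-- ===== LEMMAS AND PROOFS =====

-- net step from character a to character b (+1 rise, -1 fall, 0 tie)
def pvSg (a b : Char) : Int := if a < b then 1 else if b < a then -1 else 0

-- prefix net-step value of cs over positions 0..k
def pvS (cs : List Char) : Nat → Int
  | 0 => 0
  | k + 1 => pvS cs k + pvSg (cs.getD k ' ') (cs.getD (k + 1) ' ')

-- the pair indicator both counters count
def pvF (cs : List Char) (i j : Nat) : Int := if pvS cs i = pvS cs j then 1 else 0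

-- how often prefix value v occurs among indices < m
def pvC (cs : List Char) (m : Nat) (v : Int) : Int :=
  ∑ i ∈ Finset.range m, if pvS cs i = v then (1 : Int) else 0

-- the common value: number of index pairs i < j < n with equal prefix value
def pvPairs (cs : List Char) (n : Nat) : Int :=
  ∑ j ∈ Finset.range n, ∑ i ∈ Finset.range j, pvF cs i j

theorem pv_sg_stepA (net : Int) (a b : Char) :
    (if b < a then (if a < b then net + 1 else net) - 1 else (if a < b then net + 1 else net))
      = net + pvSg a b := by
  rcases lt_trichotomy a b with h | h | h
  · simp [pvSg, h, lt_asymm h]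
  · simp [pvSg, h]
  · simp [pvSg, h, lt_asymm h]
    omega

theorem pv_sg_stepB (p : Int) (a b : Char) :
    (if a < b then p + 1 else if b < a then p - 1 else p) = p + pvSg a b := by
  rcases lt_trichotomy a b with h | h | h
  · simp [pvSg, h]
  · simp [pvSg, h]
  · simp [pvSg, h, lt_asymm h]
    omega

theorem pv_sum_map_range (f : Nat → Int) (n : Nat) :
    ((List.range n).map f).sum = ∑ i ∈ Finset.range n, f i := by
  induction n with
  | zero => simp
  | succ n ih =>
    rw [List.range_succ, List.map_append, List.sum_append, Finset.sum_range_succ, ih]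
    simp

theorem pv_countP_eq_sum (p : Nat → Bool) (q : Nat) :
    ((List.range q).countP p : Int) = ∑ i ∈ Finset.range q, (if p i then (1 : Int) else 0) := by
  induction q with
  | zero => simp
  | succ q ih =>
    rw [List.range_succ, List.countP_append, Finset.sum_range_succ, ← ih]
    by_cases h : p q = true <;> simp [h]

theorem pv_S_add (cs : List Char) (i e : Nat) :
    pvS cs (i + e) = pvS cs i
      + ∑ k ∈ Finset.range e, pvSg (cs.getD (i + k) ' ') (cs.getD (i + k + 1) ' ') := by
  induction e with
  | zero => simp
  | succ e ih =>
    have hstep : pvS cs (i + (e + 1))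
        = pvS cs (i + e) + pvSg (cs.getD (i + e) ' ') (cs.getD (i + e + 1) ' ') := rfl
    rw [hstep, ih, Finset.sum_range_succ]
    ring

theorem pv_slice_getD (cs : List Char) (i e t : Nat) (_h : i + e + 1 ≤ cs.length) (ht : t ≤ e) :
    ((cs.drop i).take (e + 1)).getD t ' ' = cs.getD (i + t) ' ' := by
  have h1 : t < e + 1 := by omega
  rw [List.getD_eq_getElem?_getD, List.getD_eq_getElem?_getD, List.getElem?_take_of_lt h1,
    List.getElem?_drop]

-- one step of the net loop of is_pattern
theorem pv_body_step (s : List Char) (m : Nat) (net : Int) :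
    (let net1 := if PySem.List.pyGetD s ((m : Int) + 1) ' ' > PySem.List.pyGetD s (m : Int) ' ' then net + 1 else net
     if PySem.List.pyGetD s ((m : Int) + 1) ' ' < PySem.List.pyGetD s (m : Int) ' ' then net1 - 1 else net1)
    = net + pvSg (s.getD m ' ') (s.getD (m + 1) ' ') := by
  have e2 : ((m : Nat) : Int) + 1 = ((m + 1 : Nat) : Int) := by push_cast; ring
  simp only [e2, PySem.List.pyGetD_natCast, gt_iff_lt]
  exact pv_sg_stepA net (s.getD m ' ') (s.getD (m + 1) ' ')

-- the net loop of is_pattern sums the step signs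
theorem pv_net_fold (s : List Char) (m : Nat) (net : Int) :
    (PySem.List.pyRange 0 (m : Int) 1).foldl
      (fun (net : Int) i =>
        let net := if PySem.List.pyGetD s (i + 1) ' ' > PySem.List.pyGetD s i ' ' then net + 1 else net
        if PySem.List.pyGetD s (i + 1) ' ' < PySem.List.pyGetD s i ' ' then net - 1 else net)
      net
    = net + ∑ k ∈ Finset.range m, pvSg (s.getD k ' ') (s.getD (k + 1) ' ') := by
  induction m generalizing net with
  | zero =>
    rw [PySem.List.pyRange_one_eq_nil (by norm_num)]
    simp
  | succ m ih =>
    have hsplit : ((m + 1 : Nat) : Int) = ((m : Nat) : Int) + 1 := by push_cast; ring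
    rw [hsplit, PySem.List.pyRange_one_succ_right (by positivity), List.foldl_append, ih,
      List.foldl_cons, List.foldl_nil, pv_body_step, Finset.sum_range_succ]
    ring

theorem pv_isPattern_eq (cs : List Char) (i e : Nat) (h : i + e + 1 ≤ cs.length) :
    isPattern (PySem.List.slice cs (some (i : Int)) (some ((i : Int) + ((e + 1 : Nat) : Int))))
      = decide (pvS cs (i + e) = pvS cs i) := by
  unfold isPattern
  rw [PySem.List.slice_natCast_add]
  have hlen : ((cs.drop i).take (e + 1)).length = e + 1 := by
    simp
    omega
  rw [hlen]
  have hb : ((e + 1 : Nat) : Int) - 1 = (e : Int) := by push_cast; ring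
  rw [hb, pv_net_fold, zero_add]
  have hcongr : (∑ k ∈ Finset.range e,
      pvSg (((cs.drop i).take (e + 1)).getD k ' ') (((cs.drop i).take (e + 1)).getD (k + 1) ' '))
      = ∑ k ∈ Finset.range e, pvSg (cs.getD (i + k) ' ') (cs.getD (i + k + 1) ' ') := by
    refine Finset.sum_congr rfl fun k hk => ?_
    rw [Finset.mem_range] at hk
    rw [pv_slice_getD cs i e k h (by omega), pv_slice_getD cs i e (k + 1) h (by omega)]
    rfl
  rw [hcongr]
  have hsum : (∑ k ∈ Finset.range e, pvSg (cs.getD (i + k) ' ') (cs.getD (i + k + 1) ' '))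
      = pvS cs (i + e) - pvS cs i := by
    rw [pv_S_add cs i e]
    ring
  rw [hsum]
  by_cases hx : pvS cs (i + e) = pvS cs i <;> simp [hx, sub_eq_zero]

theorem pv_reindex (f : Nat → Nat → Int) (m : Nat) :
    ∑ d ∈ Finset.range m, ∑ i ∈ Finset.range (m - d), f i (i + d + 1)
      = ∑ j ∈ Finset.range (m + 1), ∑ i ∈ Finset.range j, f i j := by
  induction m with
  | zero => simp
  | succ m ih =>
    rw [Finset.sum_range_succ]
    have hlast : (∑ i ∈ Finset.range (m + 1 - m), f i (i + m + 1)) = f 0 (m + 1) := by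
      have h1 : m + 1 - m = 1 := by omega
      rw [h1]
      simp
    have h1 : ∀ d ∈ Finset.range m,
        (∑ i ∈ Finset.range (m + 1 - d), f i (i + d + 1))
          = (∑ i ∈ Finset.range (m - d), f i (i + d + 1)) + f (m - d) (m + 1) := by
      intro d hd
      rw [Finset.mem_range] at hd
      have h2 : m + 1 - d = (m - d) + 1 := by omega
      have h3 : m - d + d + 1 = m + 1 := by omega
      rw [h2, Finset.sum_range_succ, h3]
    rw [hlast, Finset.sum_congr rfl h1, Finset.sum_add_distrib, ih]
    rw [Finset.sum_range_succ (fun j => ∑ i ∈ Finset.range j, f i j) (m + 1)]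
    have hrefl : (∑ d ∈ Finset.range m, f (m - d) (m + 1))
        = ∑ d ∈ Finset.range m, f (d + 1) (m + 1) := by
      rw [← Finset.sum_range_reflect (fun d => f (d + 1) (m + 1)) m]
      exact Finset.sum_congr rfl (fun d hd => by
        rw [Finset.mem_range] at hd
        congr 1
        omega)
    rw [hrefl, Finset.sum_range_succ' (fun i => f i (m + 1)) m]
    ring

theorem pv_counterA (cs : List Char) : subpatternsCounter cs = pvPairs cs cs.length := by
  rcases Nat.eq_zero_or_pos cs.length with hN | hN
  · unfold subpatternsCounter pvPairs
    rw [hN]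
    rw [PySem.List.pyRange_one_eq_nil (by norm_num)]
    simp
  unfold subpatternsCounter
  simp only [PySem.List.foldl_if_add_one]
  rw [PySem.List.foldl_add, PySem.List.pyRange_one 2 ((cs.length : Int) + 1), List.map_map,
    pv_sum_map_range, zero_add]
  have hm : (((cs.length : Int) + 1 - 2)).toNat = cs.length - 1 := by omega
  rw [hm]
  simp only [Function.comp]
  have hterm : ∀ d : Nat,
      ((List.countP
          (fun x => isPattern (PySem.List.slice cs (some x) (some (x + (2 + (d : Int))))))
          (PySem.List.pyRange 0 ((cs.length : Int) - (2 + (d : Int)) + 1) 1) : Nat) : Int)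
        = ∑ i ∈ Finset.range (cs.length - 1 - d), pvF cs i (i + d + 1) := by
    intro d
    rw [PySem.List.pyRange_one 0 _]
    rw [show (((cs.length : Int) - (2 + (d : Int)) + 1) - 0).toNat = cs.length - 1 - d from by omega]
    rw [List.countP_map]
    have hpred : ∀ k ∈ List.range (cs.length - 1 - d),
        (((fun x => isPattern (PySem.List.slice cs (some x) (some (x + (2 + (d : Int))))))
            ∘ fun (k : Nat) => (0 : Int) + (k : Int)) k = true
          ↔ (fun (k : Nat) => decide (pvS cs (k + (d + 1)) = pvS cs k)) k = true) := by
      intro k hk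
      rw [List.mem_range] at hk
      simp only [Function.comp_apply]
      have e4 : ((0 : Int) + (k : Int)) + (2 + (d : Int))
          = ((k : Nat) : Int) + (((d + 1) + 1 : Nat) : Int) := by push_cast; ring
      have e3 : (0 : Int) + (k : Int) = ((k : Nat) : Int) := by ring
      rw [e4, e3, pv_isPattern_eq cs k (d + 1) (by omega)]
    rw [List.countP_congr hpred, pv_countP_eq_sum]
    refine Finset.sum_congr rfl fun k _ => ?_
    simp only [decide_eq_true_eq]
    by_cases hx : pvS cs (k + (d + 1)) = pvS cs k
    · rw [if_pos hx]
      unfold pvF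
      exact (if_pos (show pvS cs k = pvS cs (k + d + 1) from hx.symm)).symm
    · rw [if_neg hx]
      unfold pvF
      exact (if_neg (show ¬ pvS cs k = pvS cs (k + d + 1) from fun hh => hx hh.symm)).symm
  rw [Finset.sum_congr rfl (fun d _ => hterm d), pv_reindex (pvF cs) (cs.length - 1)]
  unfold pvPairs
  rw [show cs.length - 1 + 1 = cs.length from by omega]

theorem pvC_succ (cs : List Char) (n : Nat) (v : Int) :
    pvC cs (n + 1) v = pvC cs n v + (if pvS cs n = v then (1 : Int) else 0) := by
  unfold pvC
  rw [Finset.sum_range_succ]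

theorem pvPairs_succ (cs : List Char) (n : Nat) :
    pvPairs cs (n + 1) = pvPairs cs n + pvC cs n (pvS cs n) := by
  unfold pvPairs pvC pvF
  rw [Finset.sum_range_succ]

-- one step of B's loop, at index m+1
theorem pv_stepB_apply (cs : List Char) (m : Nat) (d0 : PySem.Dict Int Int) (p0 c0 : Int) :
    (let counts := ((d0, p0, c0) : PySem.Dict Int Int × Int × Int).1
     let p := ((d0, p0, c0) : PySem.Dict Int Int × Int × Int).2.1
     let counter := ((d0, p0, c0) : PySem.Dict Int Int × Int × Int).2.2
     let p :=
       if PySem.List.pyGetD cs ((m + 1 : Nat) : Int) ' ' > PySem.List.pyGetD cs (((m + 1 : Nat) : Int) - 1) ' ' then p + 1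
       else if PySem.List.pyGetD cs ((m + 1 : Nat) : Int) ' ' < PySem.List.pyGetD cs (((m + 1 : Nat) : Int) - 1) ' ' then p - 1
       else p
     let counter := counter + counts.getD p 0
     let counts := counts.insert p (counts.getD p 0 + 1)
     ((counts, p, counter) : PySem.Dict Int Int × Int × Int))
    = (d0.insert (p0 + pvSg (cs.getD m ' ') (cs.getD (m + 1) ' '))
          (d0.getD (p0 + pvSg (cs.getD m ' ') (cs.getD (m + 1) ' ')) 0 + 1),
        p0 + pvSg (cs.getD m ' ') (cs.getD (m + 1) ' '),
        c0 + d0.getD (p0 + pvSg (cs.getD m ' ') (cs.getD (m + 1) ' ')) 0) := by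
  have e1 : ((m + 1 : Nat) : Int) - 1 = ((m : Nat) : Int) := by push_cast; ring
  simp only [e1, PySem.List.pyGetD_natCast, gt_iff_lt]
  rw [pv_sg_stepB]

-- loop invariant of B: after processing indices 1..m the state is
-- (frequency table of pvS over 0..m, pvS m, number of equal pairs i < j ≤ m)
theorem pv_B_inv (cs : List Char) (m : Nat) :
    ∃ dd : PySem.Dict Int Int,
      ((PySem.List.pyRange 1 ((m + 1 : Nat) : Int) 1).foldl
        (fun (st : PySem.Dict Int Int × Int × Int) k =>
          let counts := st.1
          let p := st.2.1
          let counter := st.2.2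
          let p :=
            if PySem.List.pyGetD cs k ' ' > PySem.List.pyGetD cs (k - 1) ' ' then p + 1
            else if PySem.List.pyGetD cs k ' ' < PySem.List.pyGetD cs (k - 1) ' ' then p - 1
            else p
          let counter := counter + counts.getD p 0
          let counts := counts.insert p (counts.getD p 0 + 1)
          (counts, p, counter))
        (PySem.Dict.ofList [((0 : Int), (1 : Int))], 0, 0))
      = (dd, pvS cs m, pvPairs cs (m + 1))
      ∧ ∀ v : Int, dd.getD v 0 = pvC cs (m + 1) v := by
  induction m with
  | zero =>
    refine ⟨PySem.Dict.ofList [((0 : Int), (1 : Int))], ?_, ?_⟩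
    · rw [PySem.List.pyRange_one_eq_nil (by norm_num)]
      simp only [List.foldl_nil]
      simp [pvPairs, pvS]
    · intro v
      rw [show PySem.Dict.ofList [((0 : Int), (1 : Int))]
          = (PySem.Dict.empty : PySem.Dict Int Int).insert 0 1 from rfl]
      rw [PySem.Dict.getD_insert]
      unfold pvC
      rw [Finset.sum_range_one]
      by_cases hv : v = 0 <;> simp [hv, pvS, PySem.Dict.getD_empty, eq_comm]
  | succ m ih =>
    obtain ⟨dd, hfold, hdd⟩ := ih
    have hK : pvS cs (m + 1) = pvS cs m + pvSg (cs.getD m ' ') (cs.getD (m + 1) ' ') := rfl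
    have hsplit : ((m + 1 + 1 : Nat) : Int) = ((m + 1 : Nat) : Int) + 1 := by push_cast; ring
    rw [hsplit, PySem.List.pyRange_one_succ_right (by omega), List.foldl_append, hfold,
      List.foldl_cons, List.foldl_nil, pv_stepB_apply cs m dd (pvS cs m) (pvPairs cs (m + 1))]
    simp only [← hK]
    refine ⟨dd.insert (pvS cs (m + 1)) (dd.getD (pvS cs (m + 1)) 0 + 1), ?_, ?_⟩
    · simp only [Prod.mk.injEq]
      refine ⟨trivial, trivial, ?_⟩
      rw [hdd, pvPairs_succ cs (m + 1)]
    · intro v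
      rw [PySem.Dict.getD_insert, pvC_succ cs (m + 1) v]
      by_cases hv : v = pvS cs (m + 1)
      · rw [if_pos hv, if_pos hv.symm, hv, hdd]
      · rw [if_neg hv, if_neg (fun hh => hv hh.symm), add_zero, hdd]

theorem pv_counterB (cs : List Char) : (subpatternsAltState cs).2.2 = pvPairs cs cs.length := by
  unfold subpatternsAltState
  rcases hN : cs.length with _ | m
  · rw [PySem.List.pyRange_one_eq_nil (show ((0 : Nat) : Int) ≤ 1 by norm_num)]
    simp [pvPairs]
  · obtain ⟨dd, hfold, -⟩ := pv_B_inv cs m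
    rw [hfold]

-- ===== VERDICT (by name: the statement is the Claim_ definition above) =====
theorem subpatterns_spec : Claim_equal_subpatterns := by
  intro astring _
  unfold Spec_subpatterns subpatterns subpatterns_alt
  rw [pv_counterA, pv_counterB]
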